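-- pv_equiv track=rewrite | github.com/robindeshwal/Data-structure-and-algorithms-with-python | tries/hw_questions.py | sum_equals
-- ===== SOURCE A (Python) =====
-- def sum_equals(arr, n):
--   """
--   GFG: Sum equals to Sum
--   """
--   #code here.
--   hmap = {}
--
--   for i in range(n):
--     for j in range(i + 1, n):
--       ele1 = arr[i]
--       ele2 = arr[j]
--       sm = ele1 + ele2
--       if sm in hmap:
--         return 1
--       else:
--         hmap[sm] = 1
--
--   return 0
-- ===== SOURCE B (Python) =====
-- def sum_equals(arr, n):
--   # Sort-then-scan: sort all pairwise sums; a repeated sum shows up as two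
--   # adjacent equal entries in the sorted order.
--   sums = sorted(arr[i] + arr[j] for i in range(n) for j in range(i + 1, n))
--   return 1 if any(a == b for a, b in zip(sums, sums[1:])) else 0
-- ===== Notes on version B (the rewrite author's own statement) =====
-- stated objective: alternative
-- what changed: Replaces A's incremental hashmap probe with early exit by a sort-based duplicate detector: build all pairwise sums, sort them, and scan once for two adjacent equal entries.
-- outside the precondition, e.g. on sum_equals([0, 0, 0], 5): A returns 1, B raises IndexError
import Mathlib
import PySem

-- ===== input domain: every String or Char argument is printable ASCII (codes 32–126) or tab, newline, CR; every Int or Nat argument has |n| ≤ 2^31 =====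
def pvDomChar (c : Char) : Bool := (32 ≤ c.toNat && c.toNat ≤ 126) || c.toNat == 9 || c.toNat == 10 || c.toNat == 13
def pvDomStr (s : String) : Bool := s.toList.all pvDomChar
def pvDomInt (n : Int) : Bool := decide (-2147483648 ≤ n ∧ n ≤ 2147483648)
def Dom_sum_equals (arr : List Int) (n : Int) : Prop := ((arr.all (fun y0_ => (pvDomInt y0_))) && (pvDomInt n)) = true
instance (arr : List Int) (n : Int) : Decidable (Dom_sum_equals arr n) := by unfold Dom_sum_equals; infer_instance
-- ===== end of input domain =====

-- B replaces A's incremental hashmap-with-early-exit probe by a sort-based duplicate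
-- detector (sort all pairwise sums, scan once for adjacent equals); objective: alternative.

-- ===== PORT A =====
-- inner 'for j in range(i+1, n)' loop as a counter recursion (range is lazy in Python);
-- none = the early 'return 1', some hmap = loop finished
def sumEqualsInner (arr : List Int) (i j n : Int) (hmap : PySem.Dict Int Int) :
    Option (PySem.Dict Int Int) :=
  if h : j < n then
    let ele1 := PySem.List.pyGetD arr i 0   -- arr[i]; in range under Pre_
    let ele2 := PySem.List.pyGetD arr j 0   -- arr[j]; in range under Pre_
    let sm := ele1 + ele2
    if (hmap.get? sm).isSome then none
    else sumEqualsInner arr i (j + 1) n (hmap.insert sm 1)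
  else some hmap
termination_by (n - j).toNat
decreasing_by omega

-- outer 'for i in range(n)' loop as a counter recursion
def sumEqualsOuter (arr : List Int) (n i : Int) (hmap : PySem.Dict Int Int) : Int :=
  if _h : i < n then
    match sumEqualsInner arr i (i + 1) n hmap with
    | none => 1
    | some hm => sumEqualsOuter arr n (i + 1) hm
  else 0
termination_by (n - i).toNat
decreasing_by omega

def sum_equals (arr : List Int) (n : Int) : Int :=
  sumEqualsOuter arr n 0 PySem.Dict.empty

-- ===== PORT B =====
-- the generator: (arr[i] + arr[j] for i in range(n) for j in range(i+1, n))
def altSums (arr : List Int) (n : Int) : List Int :=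
  (PySem.List.pyRange 0 n 1).flatMap (fun i =>
    (PySem.List.pyRange (i + 1) n 1).map (fun j =>
      PySem.List.pyGetD arr i 0 + PySem.List.pyGetD arr j 0))

-- sums = sorted(...); then any(a == b for a, b in zip(sums, sums[1:]))
def sum_equals_alt (arr : List Int) (n : Int) : Int :=
  let sums := PySem.List.sorted (altSums arr n) (fun x => x) false
  if (sums.zip (sums.drop 1)).any (fun p => p.1 == p.2) then 1 else 0

-- ===== PRECONDITION & SPEC =====
-- Pre_ excludes n > len(arr) (with n > 1), where the Python A raises IndexError unless an
-- early duplicate pairwise sum happens to fire the return first (an early-exit artefact);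
-- B raises IndexError on all such inputs.
def Pre_sum_equals (arr : List Int) (n : Int) : Prop := n ≤ (arr.length : Int) ∨ n ≤ 1
instance (arr : List Int) (n : Int) : Decidable (Pre_sum_equals arr n) := by
  unfold Pre_sum_equals; infer_instance

def pvWitness_sum_equals : List Int × Int := ([1, 2, 3, 4], 4)

def Spec_sum_equals (arr : List Int) (n : Int) (out : Int) : Prop := out = sum_equals_alt arr n
instance (arr : List Int) (n : Int) (out : Int) : Decidable (Spec_sum_equals arr n out) := by
  unfold Spec_sum_equals; infer_instance

-- ===== CLAIM (what is proved, stated in full; the proofs are below) =====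
def Claim_equal_sum_equals : Prop := ∀ (arr : List Int) (n : Int), Dom_sum_equals arr n → Pre_sum_equals arr n → Spec_sum_equals arr n (sum_equals arr n)

-- ===== LEMMAS AND PROOFS =====

-- sequential duplicate scan: the flattened form of A's nested loops
def pvScan (S : PySem.Dict Int Int) : List Int → Option (PySem.Dict Int Int)
  | [] => some S
  | x :: rest => if (S.get? x).isSome then none else pvScan (S.insert x 1) rest

theorem pvScan_append (L1 L2 : List Int) : ∀ S,
    pvScan S (L1 ++ L2) = (pvScan S L1).bind (fun S' => pvScan S' L2) := by
  induction L1 with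
  | nil => intro S; simp [pvScan]
  | cons x rest ih =>
      intro S
      simp only [List.cons_append, pvScan]
      split_ifs with h
      · rfl
      · exact ih _

theorem sumEqualsInner_eq_scan (arr : List Int) (i n : Int) : ∀ (k : Nat) (j : Int),
    (n - j).toNat = k → ∀ S,
    sumEqualsInner arr i j n S =
      pvScan S ((PySem.List.pyRange j n 1).map
        (fun j => PySem.List.pyGetD arr i 0 + PySem.List.pyGetD arr j 0)) := by
  intro k
  induction k with
  | zero =>
      intro j hk S
      have hj : ¬ j < n := by omega
      rw [sumEqualsInner, dif_neg hj, PySem.List.pyRange_one_eq_nil (by omega)]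
      rfl
  | succ k ih =>
      intro j hk S
      have hj : j < n := by omega
      rw [sumEqualsInner, dif_pos hj, PySem.List.pyRange_one_cons hj]
      simp only [List.map_cons, pvScan]
      split_ifs with h
      · rfl
      · exact ih (j + 1) (by omega) _

theorem sumEqualsOuter_eq_scan (arr : List Int) (n : Int) : ∀ (k : Nat) (i : Int),
    (n - i).toNat = k → ∀ S,
    sumEqualsOuter arr n i S =
      (match pvScan S ((PySem.List.pyRange i n 1).flatMap (fun i =>
          (PySem.List.pyRange (i + 1) n 1).map (fun j =>
            PySem.List.pyGetD arr i 0 + PySem.List.pyGetD arr j 0))) with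
       | none => 1
       | some _ => 0) := by
  intro k
  induction k with
  | zero =>
      intro i hk S
      have hi : ¬ i < n := by omega
      rw [sumEqualsOuter, dif_neg hi, PySem.List.pyRange_one_eq_nil (by omega)]
      rfl
  | succ k ih =>
      intro i hk S
      have hi : i < n := by omega
      rw [sumEqualsOuter, dif_pos hi, PySem.List.pyRange_one_cons hi]
      simp only [List.flatMap_cons, pvScan_append,
        sumEqualsInner_eq_scan arr i n (n - (i + 1)).toNat (i + 1) rfl]
      cases pvScan S ((PySem.List.pyRange (i + 1) n 1).map
          (fun j => PySem.List.pyGetD arr i 0 + PySem.List.pyGetD arr j 0)) with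
      | none => rfl
      | some S' => simpa using ih (i + 1) (by omega) S'

theorem pvScan_none_iff (L : List Int) : ∀ S : PySem.Dict Int Int,
    (pvScan S L = none ↔ ¬ (L.Nodup ∧ ∀ x ∈ L, (S.get? x).isSome = false)) := by
  induction L with
  | nil => intro S; simp [pvScan]
  | cons x rest ih =>
      intro S
      simp only [pvScan]
      split_ifs with h
      · simp only [true_iff]
        rintro ⟨_, hall⟩
        have := hall x (by simp)
        simp [this] at h
      · rw [ih]
        have hins : ∀ y : Int, (((S.insert x 1).get? y).isSome = false) ↔
            (y ≠ x ∧ (S.get? y).isSome = false) := by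
          intro y; rw [PySem.Dict.get?_insert]; split_ifs with hyx <;> simp [hyx]
        apply not_congr
        constructor
        · rintro ⟨hnd, hall⟩
          have hxr : x ∉ rest := fun hr => ((hins x).mp (hall x hr)).1 rfl
          refine ⟨List.nodup_cons.mpr ⟨hxr, hnd⟩, ?_⟩
          intro y hy
          rcases List.mem_cons.mp hy with rfl | hy'
          · simpa using h
          · exact ((hins y).mp (hall y hy')).2
        · rintro ⟨hnd, hall⟩
          obtain ⟨hxr, hndr⟩ := List.nodup_cons.mp hnd
          refine ⟨hndr, ?_⟩
          intro y hy
          exact (hins y).mpr ⟨fun hyx => hxr (hyx ▸ hy), hall y (List.mem_cons_of_mem _ hy)⟩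

-- in a ≤-ordered list an equal pair must be adjacent: the zip-any scan finds a
-- duplicate exactly when the list is not Nodup
theorem adjAny_iff_not_nodup : ∀ (l : List Int), l.Pairwise (· ≤ ·) →
    (((l.zip (l.drop 1)).any (fun p => p.1 == p.2)) = true ↔ ¬ l.Nodup) := by
  intro l
  induction l with
  | nil => simp
  | cons a t ih =>
      cases t with
      | nil => simp
      | cons b t' =>
          intro hp
          have hpab := hp
          rw [List.pairwise_cons] at hpab
          obtain ⟨hall, hpt⟩ := hpab
          have hab : a ≤ b := hall b (by simp)
          simp only [List.drop_succ_cons, List.drop_zero, List.zip_cons_cons,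
            List.any_cons, Bool.or_eq_true, beq_iff_eq]
          simp only [List.drop_succ_cons, List.drop_zero] at ih
          rw [ih hpt]
          constructor
          · rintro (rfl | hnd)
            · intro hc
              exact (List.nodup_cons.mp hc).1 (by simp)
            · intro hc
              exact hnd (List.nodup_cons.mp hc).2
          · intro hnd
            by_cases hae : a = b
            · exact Or.inl hae
            · right
              intro hc
              apply hnd
              rw [List.nodup_cons]
              refine ⟨?_, hc⟩
              intro hmem
              rcases List.mem_cons.mp hmem with rfl | hmt
              · exact hae rfl
              · -- a ∈ t': then b ≤ a (pairwise on b::t') and a ≤ b, so a = b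
                have hba : b ≤ a := (List.pairwise_cons.mp hpt).1 a hmt
                exact hae (le_antisymm hab hba)

theorem sum_equals_eq_scan (arr : List Int) (n : Int) :
    sum_equals arr n =
      (match pvScan PySem.Dict.empty (altSums arr n) with
       | none => 1 | some _ => 0) := by
  unfold sum_equals altSums
  rw [sumEqualsOuter_eq_scan arr n (n - 0).toNat 0 rfl]

-- ===== VERDICT (by name: the statement is the Claim_ definition above) =====
theorem sum_equals_spec : Claim_equal_sum_equals := by
  intro arr n _ _
  unfold Spec_sum_equals
  rw [sum_equals_eq_scan]
  have hscan := pvScan_none_iff (altSums arr n) PySem.Dict.empty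
  simp only [PySem.Dict.get?_empty, Option.isSome_none, implies_true, and_true] at hscan
  have hperm : (PySem.List.sorted (altSums arr n) (fun x => x) false).Perm (altSums arr n) :=
    PySem.List.sorted_perm _ _ _
  have hpw : (PySem.List.sorted (altSums arr n) (fun x => x) false).Pairwise (· ≤ ·) := by
    have := PySem.List.sorted_pairwise (xs := altSums arr n) (key := fun x => x)
    simpa using this
  have hadj := adjAny_iff_not_nodup _ hpw
  rw [hperm.nodup_iff] at hadj
  by_cases hnd : (altSums arr n).Nodup
  · have hne : pvScan PySem.Dict.empty (altSums arr n) ≠ none :=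
      fun hc => (hscan.mp hc) hnd
    cases h : pvScan PySem.Dict.empty (altSums arr n) with
    | none => exact absurd h hne
    | some S' =>
        simp only [sum_equals_alt]
        rw [if_neg (fun ht => (hadj.mp ht) hnd)]
  · have h : pvScan PySem.Dict.empty (altSums arr n) = none := hscan.mpr hnd
    rw [h]
    simp only [sum_equals_alt]
    rw [if_pos (hadj.mpr hnd)]
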